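-- pv_equiv track=rewrite | github.com/vighnesh153/ds-algo | src/arrays/teemo-attacking.py | solve
-- ===== SOURCE A (Python) =====
-- def solve(arr, duration):
--     if len(arr) == 0:
--         return 0
--
--     result = 0
--     start = arr[0]
--
--     for i in range(1, len(arr)):
--         if arr[i] - arr[i - 1] > duration:
--             result += arr[i - 1] + duration - start
--             start = arr[i]
--
--     result += arr[-1] + duration - start
--     return result
-- ===== SOURCE B (Python) =====
-- def solve(arr, duration):
--     if not arr:
--         return 0
--     return duration + sum(min(duration, b - a) for a, b in zip(arr, arr[1:]))
-- ===== Notes on version B (the rewrite author's own statement) =====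
-- stated objective: simpler
-- what changed: Replaced the interval-merging state machine (start variable plus flush-on-gap branch and final flush) by a stateless one-liner: duration plus the sum of each consecutive gap clamped to duration.
import Mathlib
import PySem

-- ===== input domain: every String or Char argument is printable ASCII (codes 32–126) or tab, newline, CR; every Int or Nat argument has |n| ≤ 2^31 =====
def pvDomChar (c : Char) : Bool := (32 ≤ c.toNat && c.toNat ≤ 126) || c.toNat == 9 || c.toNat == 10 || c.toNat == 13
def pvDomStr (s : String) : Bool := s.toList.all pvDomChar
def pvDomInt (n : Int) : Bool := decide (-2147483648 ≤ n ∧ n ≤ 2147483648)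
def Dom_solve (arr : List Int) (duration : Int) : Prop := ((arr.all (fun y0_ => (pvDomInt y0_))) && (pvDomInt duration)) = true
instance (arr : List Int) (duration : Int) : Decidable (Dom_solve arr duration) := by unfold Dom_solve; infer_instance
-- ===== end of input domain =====

-- B replaces A's interval-merging state machine (start variable + flush branch) by a
-- stateless sum of per-gap clamps; objective: simpler, same O(n) cost.

-- ===== PORT A =====
-- literal port: loop over range(1, len(arr)) carrying (result, start);
-- arr[i] / arr[i-1] are in range for every visited i, so pyGetD's default is unreachable.
def solve (arr : List Int) (duration : Int) : Int :=
  if PySem.List.len arr = 0 then 0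
  else
    let p :=
      (PySem.List.pyRange 1 (PySem.List.len arr)).foldl
        (fun (rs : Int × Int) i =>
          if PySem.List.pyGetD arr i 0 - PySem.List.pyGetD arr (i - 1) 0 > duration then
            (rs.1 + PySem.List.pyGetD arr (i - 1) 0 + duration - rs.2, PySem.List.pyGetD arr i 0)
          else rs)
        (0, PySem.List.pyGetD arr 0 0)
    p.1 + PySem.List.pyGetD arr (-1) 0 + duration - p.2

-- ===== PORT B =====
def solve_alt (arr : List Int) (duration : Int) : Int :=
  if arr = [] then 0
  else
    duration +
      ((arr.zip (PySem.List.slice arr (some 1) none)).map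
        (fun q => min duration (q.2 - q.1))).sum

-- ===== PRECONDITION & SPEC =====
def Spec_solve (arr : List Int) (duration : Int) (out : Int) : Prop := out = solve_alt arr duration
instance (arr : List Int) (duration : Int) (out : Int) : Decidable (Spec_solve arr duration out) := by unfold Spec_solve; infer_instance

-- ===== CLAIM (what is proved, stated in full; the proofs are below) =====
def Claim_equal_solve : Prop := ∀ (arr : List Int) (duration : Int), Dom_solve arr duration → Spec_solve arr duration (solve arr duration)

-- ===== LEMMAS AND PROOFS =====

-- Loop invariant: after processing indices 1..k-1, the "flushed total plus pending
-- interval" equals duration plus the clamped-gap sum over the first k elements.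
theorem solve_inv (arr : List Int) (duration : Int) :
    ∀ k : Nat, 1 ≤ k → k ≤ arr.length →
      (let p :=
        (PySem.List.pyRange 1 (k : Int)).foldl
          (fun (rs : Int × Int) i =>
            if PySem.List.pyGetD arr i 0 - PySem.List.pyGetD arr (i - 1) 0 > duration then
              (rs.1 + PySem.List.pyGetD arr (i - 1) 0 + duration - rs.2, PySem.List.pyGetD arr i 0)
            else rs)
          (0, PySem.List.pyGetD arr 0 0)
       p.1 + arr.getD (k - 1) 0 + duration - p.2)
      = duration + (((arr.zip arr.tail).take (k - 1)).map (fun q => min duration (q.2 - q.1))).sum := by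
  intro k
  induction k with
  | zero => intro h; omega
  | succ k ih =>
    intro _ hk1
    by_cases hk : 1 ≤ k
    · have hkn : k ≤ arr.length := by omega
      have hrange : PySem.List.pyRange 1 ((k : Int) + 1) = PySem.List.pyRange 1 (k : Int) ++ [(k : Int)] :=
        PySem.List.pyRange_one_succ_right (by exact_mod_cast hk)
      have hcast : (((k + 1 : Nat)) : Int) = (k : Int) + 1 := by push_cast; ring
      rw [hcast, hrange]
      simp only [List.foldl_append, List.foldl_cons, List.foldl_nil]
      obtain ⟨j, rfl⟩ : ∃ j, k = j + 1 := ⟨k - 1, by omega⟩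
      have ihv := ih hk hkn
      simp only at ihv
      push_cast at ⊢ ihv
      have hklt : j + 1 < arr.length := by omega
      have hk1lt : j < arr.length := by omega
      have hgk : PySem.List.pyGetD arr ((j : Int) + 1) 0 = arr[j + 1] := by
        have hc : ((j : Int) + 1) = ((j + 1 : Nat) : Int) := by push_cast; ring
        rw [hc, PySem.List.pyGetD_natCast]
        simp [List.getD, List.getElem?_eq_getElem hklt]
      have hgk1 : PySem.List.pyGetD arr ((j : Int) + 1 - 1) 0 = arr[j] := by
        have hc : ((j : Int) + 1 - 1) = ((j : Nat) : Int) := by ring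
        rw [hc, PySem.List.pyGetD_natCast]
        simp [List.getD, List.getElem?_eq_getElem hk1lt]
      have hzlen : j < (arr.zip arr.tail).length := by
        simp [List.length_zip, List.length_tail]; omega
      have hzget : (arr.zip arr.tail)[j] = (arr[j], arr[j + 1]) := by
        have ht : arr.tail[j]'(by simp [List.length_tail]; omega) = arr[j + 1] := by
          rw [List.getElem_tail]
        simp [List.getElem_zip, ht]
      have htake : (arr.zip arr.tail).take (j + 1)
          = (arr.zip arr.tail).take j ++ [(arr[j], arr[j + 1])] := by
        rw [List.take_add_one]
        simp [List.getElem?_eq_getElem hzlen, hzget]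
      rw [htake]
      simp only [List.map_append, List.sum_append,
        List.map_cons, List.map_nil, List.sum_cons, List.sum_nil]
      -- step case analysis on the flush branch
      set p := (PySem.List.pyRange 1 ((j : Int) + 1)).foldl
          (fun (rs : Int × Int) i =>
            if PySem.List.pyGetD arr i 0 - PySem.List.pyGetD arr (i - 1) 0 > duration then
              (rs.1 + PySem.List.pyGetD arr (i - 1) 0 + duration - rs.2, PySem.List.pyGetD arr i 0)
            else rs)
          (0, PySem.List.pyGetD arr 0 0) with hp
      have hgd : arr.getD j 0 = arr[j] := by simp [List.getD, List.getElem?_eq_getElem hk1lt]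
      rw [hgd] at ihv
      have hgd2 : arr.getD (j + 1) 0 = arr[j + 1] := by
        simp [List.getD, List.getElem?_eq_getElem hklt]
      rw [hgd2]
      by_cases hbr : PySem.List.pyGetD arr ((j : Int) + 1) 0 - PySem.List.pyGetD arr ((j : Int) + 1 - 1) 0 > duration
      · simp only [if_pos hbr]
        rw [hgk, hgk1] at hbr
        have hmin : min duration (arr[j + 1] - arr[j]) = duration := by omega
        simp only [hgk]
        omega
      · simp only [if_neg hbr]
        rw [hgk, hgk1] at hbr
        have hmin : min duration (arr[j + 1] - arr[j]) = arr[j + 1] - arr[j] := by omega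
        omega
    · -- k = 0 : succ k = 1, range(1,1) is empty, take 0 is []
      have hk0 : k = 0 := by omega
      subst hk0
      have h0 : 0 < arr.length := by omega
      simp [PySem.List.pyRange, PySem.List.pyGetD_zero, List.getD,
        List.getElem?_eq_getElem h0]
      try omega

theorem solve_spec_aux (arr : List Int) (duration : Int) :
    solve arr duration = solve_alt arr duration := by
  by_cases h : arr = []
  · subst h; simp [solve, solve_alt, PySem.List.len]
  · have hlen : 1 ≤ arr.length := by
      cases arr with
      | nil => exact absurd rfl h
      | cons a as => simp
    have hinv := solve_inv arr duration arr.length hlen (le_refl _)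
    simp only at hinv
    have hlenI : PySem.List.len arr = (arr.length : Int) := by
      simp [PySem.List.len]
    have hlen0 : ¬ PySem.List.len arr = 0 := by
      rw [hlenI]; exact_mod_cast Nat.one_le_iff_ne_zero.mp hlen
    have hm1 : arr.length - 1 < arr.length := by omega
    have hneg : PySem.List.pyGetD arr (-1) 0 = arr.getD (arr.length - 1) 0 := by
      rw [show ((-1 : Int)) = -((1 : Nat) : Int) by norm_num,
        PySem.List.pyGetD_neg_natCast arr 1 0 (by norm_num) hlen]
      simp [List.getD, List.getElem?_eq_getElem hm1]
    have htake : (arr.zip arr.tail).take (arr.length - 1) = arr.zip arr.tail := by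
      apply List.take_of_length_le
      simp [List.length_zip, List.length_tail]
    rw [htake] at hinv
    unfold solve solve_alt
    rw [if_neg hlen0, if_neg h, PySem.List.slice_from_one, hlenI]
    simp only [hneg]
    exact hinv

-- ===== VERDICT (by name: the statement is the Claim_ definition above) =====
theorem solve_spec : Claim_equal_solve := by
  intro arr duration _
  unfold Spec_solve
  exact solve_spec_aux arr duration
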